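-- pv_equiv track=rewrite | github.com/KVSV1996/python_scripts | autodial_marks_oop.py | assign_operators_to_numbers
-- ===== SOURCE A (Python) =====
-- def assign_operators_to_numbers(detail_information):
--     if isinstance(detail_information, dict):
--         detail_information = [detail_information]
--
--     updated_information = []
--     for detail in detail_information:
--         client_number = detail['client_number']
--         if client_number.startswith(('+38066', '+38095', '+38050')):
--             oper = 'mts'
--         elif client_number.startswith(('+38067', '+38068', '+38096', '+38097', '+38098')):
--             oper = 'ks'
--         elif client_number.startswith(('+38063', '+38073', '+38093')):
--             oper = 'life'
--         else:
--             oper = 'unknown'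
--
--         updated_detail = detail.copy()
--         updated_detail['oper'] = oper
--         updated_information.append(updated_detail)
--
--     return updated_information
-- ===== SOURCE B (Python) =====
-- OPERATOR_PREFIXES = [
--     ('mts', ('+38066', '+38095', '+38050')),
--     ('ks', ('+38067', '+38068', '+38096', '+38097', '+38098')),
--     ('life', ('+38063', '+38073', '+38093')),
-- ]
--
--
-- def assign_operators_to_numbers(detail_information):
--     if isinstance(detail_information, dict):
--         detail_information = [detail_information]
--
--     # stage 1: pull out the numbers
--     numbers = [detail['client_number'] for detail in detail_information]
--
--     # stage 2: operator-by-operator sweep, marking still-unlabelled rows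
--     opers = ['unknown'] * len(numbers)
--     for oper, prefixes in OPERATOR_PREFIXES:
--         for i, number in enumerate(numbers):
--             if opers[i] == 'unknown' and number.startswith(prefixes):
--                 opers[i] = oper
--
--     # stage 3: zip the labels back onto copies of the rows
--     return [dict(detail, oper=oper)
--             for detail, oper in zip(detail_information, opers)]
-- ===== Notes on version B (the rewrite author's own statement) =====
-- stated objective: alternative
-- what changed: Inverts the loop nesting: B first extracts all client numbers, then sweeps operator-by-operator over the whole label array (marking rows still 'unknown'), and finally zips the labels back onto copies of the rows, instead of A's single row-loop with a 13-branch startswith cascade.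
import Mathlib
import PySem

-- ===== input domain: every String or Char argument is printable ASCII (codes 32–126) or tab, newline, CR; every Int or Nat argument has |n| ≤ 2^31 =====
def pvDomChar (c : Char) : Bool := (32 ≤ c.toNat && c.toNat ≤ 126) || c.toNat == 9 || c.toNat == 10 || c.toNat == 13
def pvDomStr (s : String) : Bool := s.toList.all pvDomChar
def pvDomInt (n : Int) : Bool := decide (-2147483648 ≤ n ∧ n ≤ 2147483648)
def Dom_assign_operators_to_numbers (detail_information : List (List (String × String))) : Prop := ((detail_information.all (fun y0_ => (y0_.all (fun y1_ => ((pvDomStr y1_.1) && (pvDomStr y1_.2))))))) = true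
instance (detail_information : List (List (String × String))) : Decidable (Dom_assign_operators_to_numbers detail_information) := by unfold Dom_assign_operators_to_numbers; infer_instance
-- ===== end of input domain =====

-- B inverts the loop nesting: it extracts the numbers, sweeps operator-by-operator
-- over the label array marking still-'unknown' rows, then zips labels back onto row
-- copies — an alternative decomposition of A's single row-loop with a branch cascade.


-- ===== PORT A =====
def assign_operators_to_numbers (detail_information : List (List (String × String))) : List (List (String × String)) :=
  -- updated_information = []; for detail in …: cascade; detail.copy(); ['oper'] = oper; append
  detail_information.foldl (fun updated_information detail =>
    let d := PySem.Dict.ofList detail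
    -- detail['client_number']  (KeyError when the key is absent: excluded by Pre_; getD "" never reached there)
    let client_number := (d.get? "client_number").getD ""
    let oper :=
      if PySem.Str.startswith client_number "+38066" ||
         PySem.Str.startswith client_number "+38095" ||
         PySem.Str.startswith client_number "+38050" then "mts"
      else if PySem.Str.startswith client_number "+38067" ||
              PySem.Str.startswith client_number "+38068" ||
              PySem.Str.startswith client_number "+38096" ||
              PySem.Str.startswith client_number "+38097" ||
              PySem.Str.startswith client_number "+38098" then "ks"
      else if PySem.Str.startswith client_number "+38063" ||
              PySem.Str.startswith client_number "+38073" ||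
              PySem.Str.startswith client_number "+38093" then "life"
      else "unknown"
    let updated_detail := d.insert "oper" oper
    updated_information ++ [updated_detail.items]) []

-- ===== PORT B =====
def pvOperatorPrefixes : List (String × List String) :=
  [("mts", ["+38066", "+38095", "+38050"]),
   ("ks", ["+38067", "+38068", "+38096", "+38097", "+38098"]),
   ("life", ["+38063", "+38073", "+38093"])]

def assign_operators_to_numbers_alt (detail_information : List (List (String × String))) : List (List (String × String)) :=
  -- stage 1: numbers = [detail['client_number'] for detail in …]
  let numbers := detail_information.map (fun detail =>
    ((PySem.Dict.ofList detail).get? "client_number").getD "")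
  -- stage 2: opers = ['unknown'] * len; operator-by-operator sweep (opers[i] = oper
  -- for each still-'unknown' index i whose number matches: elementwise map over zip)
  let opers := pvOperatorPrefixes.foldl
    (fun opers p =>
      (opers.zip numbers).map (fun on =>
        if on.1 == "unknown" && p.2.any (fun pre => PySem.Str.startswith on.2 pre) then p.1 else on.1))
    (numbers.map (fun _ => "unknown"))
  -- stage 3: [dict(detail, oper=oper) for detail, oper in zip(…, opers)]
  (detail_information.zip opers).map (fun dn =>
    ((PySem.Dict.ofList dn.1).insert "oper" dn.2).items)

-- ===== PRECONDITION & SPEC =====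
-- Pre_ excludes exactly the rows without a 'client_number' key, on which both Pythons raise KeyError.
def Pre_assign_operators_to_numbers (detail_information : List (List (String × String))) : Prop :=
  (detail_information.all (fun detail => detail.any (fun kv => kv.1 == "client_number"))) = true
instance (detail_information : List (List (String × String))) : Decidable (Pre_assign_operators_to_numbers detail_information) := by unfold Pre_assign_operators_to_numbers; infer_instance
def pvWitness_assign_operators_to_numbers : (List (List (String × String))) :=
  [[("client_number", "+38063123456"), ("duration", "7")]]

def Spec_assign_operators_to_numbers (detail_information : List (List (String × String))) (out : List (List (String × String))) : Prop := out = assign_operators_to_numbers_alt detail_information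
instance (detail_information : List (List (String × String))) (out : List (List (String × String))) : Decidable (Spec_assign_operators_to_numbers detail_information out) := by unfold Spec_assign_operators_to_numbers; infer_instance

-- ===== CLAIM (what is proved, stated in full; the proofs are below) =====
def Claim_equal_assign_operators_to_numbers : Prop := ∀ (detail_information : List (List (String × String))), Dom_assign_operators_to_numbers detail_information → Pre_assign_operators_to_numbers detail_information → Spec_assign_operators_to_numbers detail_information (assign_operators_to_numbers detail_information)

-- ===== LEMMAS AND PROOFS =====

-- A's per-row cascade, as a function of the client number
def pvCascade (c : String) : String :=
  if PySem.Str.startswith c "+38066" || PySem.Str.startswith c "+38095" ||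
     PySem.Str.startswith c "+38050" then "mts"
  else if PySem.Str.startswith c "+38067" || PySem.Str.startswith c "+38068" ||
          PySem.Str.startswith c "+38096" || PySem.Str.startswith c "+38097" ||
          PySem.Str.startswith c "+38098" then "ks"
  else if PySem.Str.startswith c "+38063" || PySem.Str.startswith c "+38073" ||
          PySem.Str.startswith c "+38093" then "life"
  else "unknown"

-- B's three staged sweeps starting from all-'unknown' compute A's cascade per number
theorem pv_sweeps_eq (numbers : List String) :
    pvOperatorPrefixes.foldl
      (fun opers p =>
        (opers.zip numbers).map (fun on =>
          if on.1 == "unknown" && p.2.any (fun pre => PySem.Str.startswith on.2 pre) then p.1 else on.1))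
      (numbers.map (fun _ => "unknown")) = numbers.map pvCascade := by
  simp only [pvOperatorPrefixes, List.foldl_cons, List.foldl_nil]
  induction numbers with
  | nil => rfl
  | cons c t ih =>
    simp only [List.map_cons, List.zip_cons_cons, ih]
    refine congrArg (· :: t.map pvCascade) ?_
    simp only [List.any_cons, List.any_nil, Bool.or_false, pvCascade]
    generalize PySem.Str.startswith c "+38066" = b1
    generalize PySem.Str.startswith c "+38095" = b2
    generalize PySem.Str.startswith c "+38050" = b3
    generalize PySem.Str.startswith c "+38067" = b4
    generalize PySem.Str.startswith c "+38068" = b5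
    generalize PySem.Str.startswith c "+38096" = b6
    generalize PySem.Str.startswith c "+38097" = b7
    generalize PySem.Str.startswith c "+38098" = b8
    generalize PySem.Str.startswith c "+38063" = b9
    generalize PySem.Str.startswith c "+38073" = b10
    generalize PySem.Str.startswith c "+38093" = b11
    revert b1 b2 b3 b4 b5 b6 b7 b8 b9 b10 b11
    decide

-- zipping a list with a map of itself and mapping is one map
theorem pv_zip_self_map {α β : Type} (xs : List α) (f : α → String) (g : α × String → β) :
    (xs.zip (xs.map f)).map g = xs.map (fun x => g (x, f x)) := by
  induction xs with
  | nil => rfl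
  | cons a t ih => simp only [List.map_cons, List.zip_cons_cons, ih]

-- ===== VERDICT (by name: the statement is the Claim_ definition above) =====
theorem assign_operators_to_numbers_spec : Claim_equal_assign_operators_to_numbers := by
  intro di _ _
  unfold Spec_assign_operators_to_numbers assign_operators_to_numbers assign_operators_to_numbers_alt
  rw [PySem.List.foldl_append_singleton_eq_map, List.nil_append]
  simp only []
  rw [pv_sweeps_eq, List.map_map, pv_zip_self_map]
  refine List.map_congr_left ?_
  intro detail _
  simp [Function.comp, pvCascade]
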